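-- pv_equiv track=rewrite | github.com/r-visser/shapiq | shapiq/utils/sets.py | pair_subset_sizes
-- ===== SOURCE A (Python) =====
-- from typing import Iterable, Any, Optional
--
-- def pair_subset_sizes(order: int, n: int) -> tuple[list[tuple[int, int]], Optional[int]]:
--     """Determines what subset sizes are paired together.
--
--     Given an interaction order and the number of players, determines the paired subsets. Paired
--     subsets are subsets of the same size that are paired together moving from the smallest subset
--     paired with the largest subset to the center.
--
--     Args:
--         order: interaction order.
--         n: number of players.
--
--     Returns:
--         paired and unpaired subsets. If there is no unpaired subset `unpaired_subset` is None.
--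
--     Examples:
--         >>> pair_subset_sizes(order=1, n=5)
--         ([(1, 4), (2, 3)], None)
--
--         >>> pair_subset_sizes(order=1, n=6)
--         ([(1, 5), (2, 4)], 3)
--
--         >>> pair_subset_sizes(order=2, n=5)
--         ([(2, 3)], None)
--     """
--     subset_sizes = list(range(order, n - order + 1))
--     n_paired_subsets = len(subset_sizes) // 2
--     paired_subsets = [
--         (subset_sizes[size - 1], subset_sizes[-size]) for size in range(1, n_paired_subsets + 1)
--     ]
--     unpaired_subset = None if len(subset_sizes) % 2 == 0 else subset_sizes[n_paired_subsets]
--     return paired_subsets, unpaired_subset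
-- ===== SOURCE B (Python) =====
-- def pair_subset_sizes(order: int, n: int):
--     """Two-pointer inward walk instead of materializing the size list."""
--     low, high = order, n - order
--     paired = []
--     while low < high:
--         paired.append((low, high))
--         low += 1
--         high -= 1
--     return paired, (low if low == high else None)
-- ===== Notes on version B (the rewrite author's own statement) =====
-- stated objective: simpler
-- what changed: Replaced the materialized range list with its index-arithmetic comprehension and parity test by a two-pointer inward walk whose meeting point detects the unpaired middle size.
import Mathlib
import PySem

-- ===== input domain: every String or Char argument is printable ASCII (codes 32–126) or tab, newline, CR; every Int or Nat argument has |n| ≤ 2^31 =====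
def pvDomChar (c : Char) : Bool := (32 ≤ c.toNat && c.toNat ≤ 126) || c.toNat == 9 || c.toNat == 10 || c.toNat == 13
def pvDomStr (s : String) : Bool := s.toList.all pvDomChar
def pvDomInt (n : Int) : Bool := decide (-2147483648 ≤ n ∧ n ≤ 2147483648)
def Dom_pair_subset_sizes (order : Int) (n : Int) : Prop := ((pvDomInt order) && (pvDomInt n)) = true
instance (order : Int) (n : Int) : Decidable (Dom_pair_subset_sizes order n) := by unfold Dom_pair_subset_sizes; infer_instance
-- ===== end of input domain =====

-- B replaces the materialized size list + index-arithmetic comprehension by a two-pointer inward walk (objective: simpler).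

-- ===== PORT A =====
def pair_subset_sizes (order : Int) (n : Int) : (List (Int × Int)) × Option Int :=
  let subset_sizes := PySem.List.pyRange order (n - order + 1) 1
  let n_paired_subsets : Int := PySem.Int.floordiv (subset_sizes.length : Int) 2
  let paired_subsets :=
    (PySem.List.pyRange 1 (n_paired_subsets + 1) 1).map
      (fun size => (PySem.List.pyGetD subset_sizes (size - 1) 0,
                    PySem.List.pyGetD subset_sizes (-size) 0))
  let unpaired_subset : Option Int :=
    if PySem.Int.mod (subset_sizes.length : Int) 2 = 0 then none
    else PySem.List.pyGet? subset_sizes n_paired_subsets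
  (paired_subsets, unpaired_subset)

-- ===== PORT B =====
-- the while-loop of Source B as the obvious structural recursion on the gap
def pvTwoPtr (low high : Int) : (List (Int × Int)) × Option Int :=
  if low < high then
    let rest := pvTwoPtr (low + 1) (high - 1)
    ((low, high) :: rest.1, rest.2)
  else if low = high then ([], some low)
  else ([], none)
termination_by (high - low).toNat
decreasing_by omega

def pair_subset_sizes_alt (order : Int) (n : Int) : (List (Int × Int)) × Option Int :=
  pvTwoPtr order (n - order)

-- ===== PRECONDITION & SPEC =====
def Spec_pair_subset_sizes (order : Int) (n : Int) (out : (List (Int × Int)) × Option Int) : Prop := out = pair_subset_sizes_alt order n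
instance (order : Int) (n : Int) (out : (List (Int × Int)) × Option Int) : Decidable (Spec_pair_subset_sizes order n out) := by unfold Spec_pair_subset_sizes; infer_instance

-- ===== CLAIM (what is proved, stated in full; the proofs are below) =====
def Claim_equal_pair_subset_sizes : Prop := ∀ (order : Int) (n : Int), Dom_pair_subset_sizes order n → Spec_pair_subset_sizes order n (pair_subset_sizes order n)

-- ===== LEMMAS AND PROOFS =====

-- common closed form: for gap d ≥ 0, pairs (low+i, low+d-i) for i < (d+1)/2,
-- middle element low + d/2 iff d is even
def pvClosed (low : Int) (d : ℕ) : (List (Int × Int)) × Option Int :=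
  ((List.range ((d + 1) / 2)).map (fun i : ℕ => (low + (i : Int), low + (d : Int) - (i : Int))),
   if d % 2 = 0 then some (low + ((d / 2 : ℕ) : Int)) else none)

theorem pvTwoPtr_nil (low high : Int) (h : high < low) : pvTwoPtr low high = ([], none) := by
  unfold pvTwoPtr
  rw [if_neg (by omega), if_neg (by omega)]

theorem pvTwoPtr_closed (d : ℕ) (low : Int) : pvTwoPtr low (low + d) = pvClosed low d := by
  induction d using Nat.twoStepInduction generalizing low with
  | zero =>
    unfold pvTwoPtr pvClosed
    simp
  | one =>
    unfold pvTwoPtr pvClosed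
    rw [if_pos (by omega)]
    unfold pvTwoPtr
    rw [if_neg (by omega), if_neg (by omega)]
    simp
  | more d ih _ =>
    have hstep : pvTwoPtr low (low + ((d + 2 : ℕ) : Int))
        = ((low, low + ((d + 2 : ℕ) : Int)) :: (pvClosed (low + 1) d).1, (pvClosed (low + 1) d).2) := by
      unfold pvTwoPtr
      rw [if_pos (by omega)]
      have h1 : low + ((d + 2 : ℕ) : Int) - 1 = (low + 1) + (d : ℕ) := by push_cast; omega
      rw [h1, ih (low + 1)]
    rw [hstep]
    unfold pvClosed
    simp only [Prod.mk.injEq]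
    refine ⟨?_, ?_⟩
    · have h2 : (d + 2 + 1) / 2 = (d + 1) / 2 + 1 := by omega
      rw [h2, List.range_succ_eq_map, List.map_cons, List.map_map]
      simp only [List.cons.injEq, Prod.mk.injEq]
      refine ⟨⟨by push_cast; ring, by push_cast; ring⟩, ?_⟩
      refine List.map_congr_left ?_
      intro i _
      simp only [Function.comp_apply, Prod.mk.injEq]
      constructor <;> (push_cast; ring)
    · have h3 : (d + 2) % 2 = d % 2 := by omega
      have h4 : (d + 2) / 2 = d / 2 + 1 := by omega
      rw [h3, h4]
      split
      · congr 1; push_cast; ring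
      · rfl

theorem pvA_closed (order n : Int) (h : 0 ≤ n - 2 * order) :
    pair_subset_sizes order n = pvClosed order (n - 2 * order).toNat := by
  set d : ℕ := (n - 2 * order).toNat with hd
  unfold pair_subset_sizes pvClosed
  simp only
  have hLr : PySem.List.pyRange order (n - order + 1) 1
      = (List.range (d + 1)).map (fun k : ℕ => order + (k : Int)) := by
    rw [PySem.List.pyRange_one]
    have he : (n - order + 1 - order).toNat = d + 1 := by omega
    rw [he]
  rw [hLr]
  have hL : ((List.range (d + 1)).map (fun k : ℕ => order + (k : Int))).length = d + 1 := by simp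
  rw [hL]
  have hfl : PySem.Int.floordiv ((d + 1 : ℕ) : Int) 2 = (((d + 1) / 2 : ℕ) : Int) := by
    exact_mod_cast PySem.Int.floordiv_natCast (d + 1) 2
  rw [hfl]
  simp only [Prod.mk.injEq]
  refine ⟨?_, ?_⟩
  · -- the paired list
    have hr : PySem.List.pyRange 1 ((((d + 1) / 2 : ℕ) : Int) + 1) 1
        = (List.range ((d + 1) / 2)).map (fun k : ℕ => 1 + (k : Int)) := by
      rw [PySem.List.pyRange_one]
      have he : ((((d + 1) / 2 : ℕ) : Int) + 1 - 1).toNat = (d + 1) / 2 := by omega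
      rw [he]
    rw [hr, List.map_map]
    refine List.map_congr_left ?_
    intro i hi
    rw [List.mem_range] at hi
    simp only [Function.comp_apply, Prod.mk.injEq]
    have hi1 : i < d + 1 := by omega
    refine ⟨?_, ?_⟩
    · have he : (1 : Int) + (i : Int) - 1 = ((i : ℕ) : Int) := by push_cast; ring
      rw [he, PySem.List.pyGetD_natCast]
      rw [List.getD_eq_getElem _ _ (by simp; omega)]
      simp
    · have he : -((1 : Int) + (i : Int)) = -(((i + 1 : ℕ) : Int)) := by push_cast; ring
      rw [he, PySem.List.pyGetD_neg_natCast _ _ _ (by omega) (by simp; omega)]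
      simp only [List.length_map, List.length_range, List.getElem_map, List.getElem_range]
      have h5 : ((d + 1 - (i + 1) : ℕ) : Int) = (d : Int) - (i : Int) := by omega
      rw [h5]
      ring
  · -- the unpaired middle
    have hm : PySem.Int.mod ((d + 1 : ℕ) : Int) 2 = (((d + 1) % 2 : ℕ) : Int) := by
      exact_mod_cast PySem.Int.mod_natCast (d + 1) 2
    rw [hm]
    by_cases hpar : d % 2 = 0
    · have h1 : (d + 1) % 2 = 1 := by omega
      rw [if_neg (by rw [h1]; norm_num), if_pos hpar]
      rw [PySem.List.pyGet?_natCast]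
      rw [List.getElem?_eq_getElem (by simp; omega)]
      simp only [List.getElem_map, List.getElem_range]
      have h2 : (d + 1) / 2 = d / 2 := by omega
      rw [h2]
    · have h1 : (d + 1) % 2 = 0 := by omega
      rw [if_pos (by rw [h1]; norm_num), if_neg hpar]

theorem pvA_nil (order n : Int) (h : n - 2 * order < 0) :
    pair_subset_sizes order n = ([], none) := by
  unfold pair_subset_sizes
  simp only
  have hL : (PySem.List.pyRange order (n - order + 1) 1).length = 0 := by
    rw [PySem.List.length_pyRange_one]; omega
  rw [hL]
  norm_num [PySem.Int.floordiv, PySem.Int.mod, PySem.List.pyRange_one]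

-- ===== VERDICT (by name: the statement is the Claim_ definition above) =====
theorem pair_subset_sizes_spec : Claim_equal_pair_subset_sizes := by
  intro order n _
  unfold Spec_pair_subset_sizes pair_subset_sizes_alt
  by_cases h : 0 ≤ n - 2 * order
  · have hh : n - order = order + ((n - 2 * order).toNat : Int) := by omega
    rw [pvA_closed order n h, hh, pvTwoPtr_closed]
  · rw [pvA_nil order n (by omega), pvTwoPtr_nil order (n - order) (by omega)]
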